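-- pv_equiv track=rewrite | github.com/simoesmiguel/RecommenderSytemForPersonalizedLearningStrategies | MyMLModel2.py | buildInputandOutput
-- ===== SOURCE A (Python) =====
-- def buildInputandOutput(file):
--     dimensions = file[0]
--     indexes_input_dimensions=[dimensions.index(el) for el in dimensions if el == "cluster" or "Student" in el]
--     indexes_output_dimenisons=[dimensions.index(el) for el in dimensions if "Next" in el]
--
--     input, output=[], []
--
--     for line in file[1:]:
--         dic_input={}
--         dic_output={}
--         for index in indexes_input_dimensions:
--             dic_input[dimensions[index]] = line[index]
--         for index in indexes_output_dimenisons: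
--             dic_output[dimensions[index]] = line[index]
--
--         input.append(dic_input)
--         output.append(dic_output)
--
--         '''
--         example of dic_input:
--             {'cluster': '2', 'Student skills': '[]', 'Student badges': "['00400211onechallenge:250', '00800611postonetypeofcreativeresult:400', ...]", 'Student bonus': "['20308222AttendedQuiz:200', ...]", 'Student quizzes': '[]', 'Student posts': '[]'}
--
--         example of dic_output :
--             {'Next Skills': '[]', 'Next badges': "['03502011betherefor50%oflabs:250', '03000611postfive(ormore)typesofcreativeresults:600', '01901111makeonepost:100']"}
--         '''
--
--     return input, output
-- ===== SOURCE B (Python) =====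
-- def buildInputandOutput(file):
--     dimensions = file[0]
--     input, output = [], []
--     for line in file[1:]:
--         dic_input = {}
--         dic_output = {}
--         for name, value in zip(dimensions, line):
--             if name == "cluster" or "Student" in name:
--                 dic_input[name] = value
--             if "Next" in name:
--                 dic_output[name] = value
--         input.append(dic_input)
--         output.append(dic_output)
--     return input, output
-- ===== Notes on version B (the rewrite author's own statement) =====
-- stated objective: simpler
-- what changed: A precomputes two .index-based column-index lists and runs two index-driven passes per row; B drops the index lists and classifies each (name, value) pair of zip(dimensions, line) into the input/output dict in a single per-row pass.
-- outside the precondition, e.g. on buildInputandOutput([['cluster', 'Next'], ['a']]): A raises IndexError, B returns ([{'cluster': 'a'}], [{}])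
import Mathlib
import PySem

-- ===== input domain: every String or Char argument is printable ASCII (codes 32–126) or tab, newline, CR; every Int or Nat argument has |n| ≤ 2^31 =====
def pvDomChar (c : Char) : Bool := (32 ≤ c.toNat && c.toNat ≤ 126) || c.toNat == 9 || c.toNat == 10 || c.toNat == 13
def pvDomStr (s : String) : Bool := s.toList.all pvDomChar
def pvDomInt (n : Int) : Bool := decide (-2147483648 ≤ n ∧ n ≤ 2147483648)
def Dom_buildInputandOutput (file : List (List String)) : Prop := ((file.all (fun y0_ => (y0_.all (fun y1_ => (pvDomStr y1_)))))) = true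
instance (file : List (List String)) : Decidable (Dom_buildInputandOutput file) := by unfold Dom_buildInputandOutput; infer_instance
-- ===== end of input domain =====

-- B replaces A's two precomputed `.index`-driven index lists by a single per-row
-- classification pass over zip(dimensions, line) (objective: simpler).

-- ===== PORT A =====
-- el == "cluster" or "Student" in el
def pvMatchIn (el : String) : Bool := el == "cluster" || PySem.Str.isIn "Student" el
-- "Next" in el
def pvMatchOut (el : String) : Bool := PySem.Str.isIn "Next" el

-- Python's file[0] raises IndexError on file = [] (excluded by Pre_): headD [] stands for file[0].
-- line[index] raises IndexError when index ≥ len(line) (excluded by Pre_): (pyGet? …).getD "" stands for it.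
-- dimensions.index(el) always succeeds (el is drawn from dimensions), so (index? …).getD 0 is exact.
def buildInputandOutput (file : List (List String)) : (List (List (String × String))) × (List (List (String × String))) :=
  let dimensions := file.headD []
  let indexesInput : List Nat :=
    (dimensions.filter (fun el => pvMatchIn el)).map (fun el => (PySem.List.index? dimensions el).getD 0)
  let indexesOutput : List Nat :=
    (dimensions.filter (fun el => pvMatchOut el)).map (fun el => (PySem.List.index? dimensions el).getD 0)
  file.tail.foldl (fun acc line =>
    let dicInput := indexesInput.foldl
      (fun (d : PySem.Dict String String) i =>
        d.insert (dimensions.getD i "") ((PySem.List.pyGet? line (i : Int)).getD "")) PySem.Dict.empty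
    let dicOutput := indexesOutput.foldl
      (fun (d : PySem.Dict String String) i =>
        d.insert (dimensions.getD i "") ((PySem.List.pyGet? line (i : Int)).getD "")) PySem.Dict.empty
    (acc.1 ++ [dicInput.items], acc.2 ++ [dicOutput.items])) ([], [])

-- ===== PORT B =====
def buildInputandOutput_alt (file : List (List String)) : (List (List (String × String))) × (List (List (String × String))) :=
  let dimensions := file.headD []
  file.tail.foldl (fun acc line =>
    let dics := (dimensions.zip line).foldl
      (fun (d : PySem.Dict String String × PySem.Dict String String) nv =>
        (if pvMatchIn nv.1 then d.1.insert nv.1 nv.2 else d.1,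
         if pvMatchOut nv.1 then d.2.insert nv.1 nv.2 else d.2))
      (PySem.Dict.empty, PySem.Dict.empty)
    (acc.1 ++ [dics.1.items], acc.2 ++ [dics.2.items])) ([], [])

-- ===== PRECONDITION & SPEC =====
-- Pre_ excludes (a) inputs where A raises IndexError: the empty file, and rows on which some
-- matched column index is out of range; and (b) headers whose matched ("cluster"/"Student"/"Next")
-- names repeat, where A's `.index` first-occurrence value and B's zip last-wins value are both
-- accidental choices for a duplicate key.
def Pre_buildInputandOutput (file : List (List String)) : Prop :=
  file ≠ [] ∧
  ((file.headD []).filter (fun el => pvMatchIn el || pvMatchOut el)).Nodup ∧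
  ∀ line ∈ file.tail, ∀ i < (file.headD []).length,
    (pvMatchIn ((file.headD []).getD i "") || pvMatchOut ((file.headD []).getD i "")) = true →
    i < line.length
instance (file : List (List String)) : Decidable (Pre_buildInputandOutput file) := by
  unfold Pre_buildInputandOutput; infer_instance

def pvWitness_buildInputandOutput : List (List String) :=
  [["cluster", "Student a", "Next b", "z"], ["1", "2", "3", "4"]]

def Spec_buildInputandOutput (file : List (List String)) (out : (List (List (String × String))) × (List (List (String × String)))) : Prop := out = buildInputandOutput_alt file
instance (file : List (List String)) (out : (List (List (String × String))) × (List (List (String × String)))) : Decidable (Spec_buildInputandOutput file out) := by unfold Spec_buildInputandOutput; infer_instance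

-- ===== CLAIM (what is proved, stated in full; the proofs are below) =====
def Claim_equal_buildInputandOutput : Prop := ∀ (file : List (List String)), Dom_buildInputandOutput file → Pre_buildInputandOutput file → Spec_buildInputandOutput file (buildInputandOutput file)

-- ===== LEMMAS AND PROOFS =====

-- the value A reads for column el of a row
def pvVal (dims line : List String) (el : String) : String :=
  (PySem.List.pyGet? line (((PySem.List.index? dims el).getD 0 : Nat) : Int)).getD ""

-- congruence for foldl over the members of the list
theorem pvFoldlCongr {a b : Type} (l : List a) (f g : b -> a -> b) (init : b)
    (h : forall acc x, x ∈ l -> f acc x = g acc x) : l.foldl f init = l.foldl g init := by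
  induction l generalizing init with
  | nil => rfl
  | cons x xs ih =>
    rw [List.foldl_cons, List.foldl_cons, h init x (by simp)]
    exact ih _ (fun acc y hy => h acc y (List.mem_cons_of_mem _ hy))

-- B's single fold over a pair of dicts splits into two independent folds
theorem pvFoldlPair (l : List (String × String)) (b c : PySem.Dict String String) :
    l.foldl (fun d nv =>
      (if pvMatchIn nv.1 then d.1.insert nv.1 nv.2 else d.1,
       if pvMatchOut nv.1 then d.2.insert nv.1 nv.2 else d.2)) (b, c)
    = (l.foldl (fun d nv => if pvMatchIn nv.1 then d.insert nv.1 nv.2 else d) b,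
       l.foldl (fun d nv => if pvMatchOut nv.1 then d.insert nv.1 nv.2 else d) c) := by
  induction l generalizing b c with
  | nil => rfl
  | cons x xs ih => simp only [List.foldl_cons, ih]

-- key lemma: the index-lookup view of a row equals the zip view, for any column predicate,
-- provided the matched columns are distinct and every matched index is in range
theorem pvKey (p : String → Bool) :
    ∀ (dims line : List String), (dims.filter p).Nodup →
    (∀ i, (hi : i < dims.length) → p dims[i] = true → i < line.length) →
    (dims.filter p).map (fun el => (el, pvVal dims line el)) =
      (dims.zip line).filter (fun nv => p nv.1) := by
  intro dims
  induction dims with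
  | nil => intro line _ _; simp
  | cons d ds ih =>
    intro line hnd hlen
    cases line with
    | nil =>
      have hall : (d :: ds).filter p = [] := by
        rw [List.filter_eq_nil_iff]
        intro a ha hpa
        obtain ⟨i, hi, hget⟩ := List.getElem_of_mem ha
        have := hlen i hi (hget ▸ hpa)
        simp at this
      simp [hall]
    | cons v vs =>
      have hlen' : ∀ i, (hi : i < ds.length) → p ds[i] = true → i < vs.length := by
        intro i hi hp
        have h2 : (i+1) < (d :: ds).length := by simpa using Nat.succ_lt_succ hi
        have h3 := hlen (i+1) h2 (by simpa using hp)
        simp only [List.length_cons] at h3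
        omega
      have hnd' : (ds.filter p).Nodup := by
        by_cases hp : p d
        · simp only [List.filter_cons, hp, if_true, List.nodup_cons] at hnd
          exact hnd.2
        · simpa only [List.filter_cons, hp, if_false] using hnd
      have hne : ∀ el ∈ ds.filter p, el ≠ d := by
        intro el hel
        by_cases hp : p d
        · simp only [List.filter_cons, hp, if_true, List.nodup_cons] at hnd
          intro heq; exact hnd.1 (heq ▸ hel)
        · intro heq
          exact hp (heq ▸ (List.mem_filter.mp hel).2)
      have hval : ∀ el ∈ ds.filter p, pvVal (d :: ds) (v :: vs) el = pvVal ds vs el := by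
        intro el hel
        have helm : el ∈ ds := (List.mem_filter.mp hel).1
        obtain ⟨k, hk⟩ := Option.isSome_iff_exists.mp
          ((PySem.List.index?_isSome_iff (xs := ds) (v := el)).mpr helm)
        have hdne : d ≠ el := fun h => hne el hel h.symm
        unfold pvVal
        rw [PySem.List.index?_cons_of_ne ds hdne, hk]
        simp
      have hmap : (ds.filter p).map (fun el => (el, pvVal (d :: ds) (v :: vs) el))
          = (ds.zip vs).filter (fun nv => p nv.1) := by
        rw [List.map_congr_left (fun el hel => by rw [hval el hel])]
        exact ih vs hnd' hlen'
      by_cases hp : p d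
      · have hhead : pvVal (d :: ds) (v :: vs) d = v := by
          unfold pvVal
          rw [PySem.List.index?_cons_self]
          simp
        simp only [List.zip_cons_cons, List.filter_cons, hp, if_true, List.map_cons]
        rw [hhead, hmap]
      · simp only [List.zip_cons_cons, List.filter_cons, hp]
        exact hmap

theorem pvAItems (p : String → Bool) (dims line : List String)
    (hnd : (dims.filter p).Nodup) :
    (((dims.filter p).map (fun el => (PySem.List.index? dims el).getD 0)).foldl
      (fun (d : PySem.Dict String String) i =>
        d.insert (dims.getD i "") ((PySem.List.pyGet? line (i : Int)).getD "")) PySem.Dict.empty).items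
    = (dims.filter p).map (fun el => (el, pvVal dims line el)) := by
  rw [List.foldl_map]
  rw [pvFoldlCongr _ _ (fun (d : PySem.Dict String String) el => d.insert el (pvVal dims line el)) _ ?hc]
  case hc =>
    intro acc el hel
    dsimp only
    have helm : el ∈ dims := (List.mem_filter.mp hel).1
    obtain ⟨k, hk⟩ := Option.isSome_iff_exists.mp
      ((PySem.List.index?_isSome_iff (xs := dims) (v := el)).mpr helm)
    obtain ⟨hklt, hkel, -⟩ := PySem.List.getElem_of_index?_eq_some hk
    have hidx : (PySem.List.index? dims el).getD 0 = k := by rw [hk]; rfl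
    have hgd : dims.getD k "" = el := by rw [List.getD_eq_getElem _ _ hklt, hkel]
    unfold pvVal
    rw [hidx, hgd]
  simpa using PySem.Dict.items_foldl_insert_fresh (dims.filter p) (fun el => el)
    (fun el => pvVal dims line el) PySem.Dict.empty (by intro a _; simp) (by simpa using hnd)

theorem pvBItems (p : String → Bool) (dims line : List String)
    (hnd : (dims.filter p).Nodup)
    (hlen : ∀ i, (hi : i < dims.length) → p dims[i] = true → i < line.length) :
    (((dims.zip line).filter (fun nv => p nv.1)).foldl
      (fun (d : PySem.Dict String String) nv => d.insert nv.1 nv.2) PySem.Dict.empty).items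
    = (dims.filter p).map (fun el => (el, pvVal dims line el)) := by
  rw [← pvKey p dims line hnd hlen]
  rw [List.foldl_map]
  simpa using PySem.Dict.items_foldl_insert_fresh (dims.filter p) (fun el => el)
    (fun el => pvVal dims line el) PySem.Dict.empty (by intro a _; simp) (by simpa using hnd)

-- per-predicate: A's per-row dict equals B's per-row dict
theorem pvDicts (p : String → Bool) (dims line : List String)
    (hnd : (dims.filter p).Nodup)
    (hlen : ∀ i, (hi : i < dims.length) → p dims[i] = true → i < line.length) :
    (((dims.filter p).map (fun el => (PySem.List.index? dims el).getD 0)).foldl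
      (fun (d : PySem.Dict String String) i =>
        d.insert (dims.getD i "") ((PySem.List.pyGet? line (i : Int)).getD "")) PySem.Dict.empty).items
    = ((dims.zip line).foldl
      (fun (d : PySem.Dict String String) nv => if p nv.1 then d.insert nv.1 nv.2 else d) PySem.Dict.empty).items := by
  rw [PySem.List.foldl_if_eq_foldl_filter]
  rw [pvAItems p dims line hnd, pvBItems p dims line hnd hlen]


-- ===== VERDICT (by name: the statement is the Claim_ definition above) =====
theorem buildInputandOutput_spec : Claim_equal_buildInputandOutput := by
  intro file _ hpre
  obtain ⟨-, hnd, hlen⟩ := hpre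
  show buildInputandOutput file = buildInputandOutput_alt file
  unfold buildInputandOutput buildInputandOutput_alt
  refine pvFoldlCongr _ _ _ _ ?_
  intro acc line hline
  dsimp only
  have hlen' : ∀ i, (hi : i < (file.headD []).length) →
      (pvMatchIn (file.headD [])[i] || pvMatchOut (file.headD [])[i]) = true → i < line.length := by
    intro i hi h
    refine hlen line hline i hi ?_
    rwa [List.getD_eq_getElem _ _ hi]
  have hndIn : ((file.headD []).filter (fun el => pvMatchIn el)).Nodup :=
    ((List.monotone_filter_right _ (fun a h => by simp [h])).nodup hnd)
  have hndOut : ((file.headD []).filter (fun el => pvMatchOut el)).Nodup :=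
    ((List.monotone_filter_right _ (fun a h => by simp [h])).nodup hnd)
  have hlenIn : ∀ i, (hi : i < (file.headD []).length) →
      pvMatchIn (file.headD [])[i] = true → i < line.length :=
    fun i hi h => hlen' i hi (by rw [h, Bool.true_or])
  have hlenOut : ∀ i, (hi : i < (file.headD []).length) →
      pvMatchOut (file.headD [])[i] = true → i < line.length :=
    fun i hi h => hlen' i hi (by rw [h, Bool.or_true])
  rw [pvFoldlPair]
  rw [pvDicts pvMatchIn (file.headD []) line hndIn hlenIn,
      pvDicts pvMatchOut (file.headD []) line hndOut hlenOut]
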